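-- pv_equiv track=rewrite | github.com/Pelobates/Python-Projects | Project 6-AGi/Lab 12.py | calcul_pozitie
-- ===== SOURCE A (Python) =====
-- def calcul_pozitie(n):
--     p = []
--     val = 0
--     for i in range(0, n):
--         val = val + 2
--         p.append(val)
--         for j in range(1, i + 1):
--             val = val + 1
--             p.append(val)
--     return p
-- ===== SOURCE B (Python) =====
-- def calcul_pozitie(n):
--     p = []
--     for i in range(n):
--         start = 2 + i * (i + 3) // 2
--         p.extend(range(start, start + i + 1))
--     return p
-- ===== Notes on version B (the rewrite author's own statement) =====
-- stated objective: simpler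
-- what changed: Replaces A's mutable running counter with nested +2/+1 increment loops by a closed-form block start 2 + i*(i+3)//2 and one range-extend per block.
import Mathlib
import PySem

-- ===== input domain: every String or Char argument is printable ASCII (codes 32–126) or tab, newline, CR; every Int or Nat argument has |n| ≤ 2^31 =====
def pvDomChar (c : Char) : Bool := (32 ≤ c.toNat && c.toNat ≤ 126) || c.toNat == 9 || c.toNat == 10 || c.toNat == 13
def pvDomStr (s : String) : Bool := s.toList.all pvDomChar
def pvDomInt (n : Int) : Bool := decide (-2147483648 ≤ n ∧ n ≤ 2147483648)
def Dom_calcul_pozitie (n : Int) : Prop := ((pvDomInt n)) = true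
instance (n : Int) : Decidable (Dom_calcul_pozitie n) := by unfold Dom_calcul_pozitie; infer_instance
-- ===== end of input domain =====

-- B replaces A's mutable running counter (+2 / +1 bookkeeping) by a closed-form block
-- start 2 + i*(i+3)//2 and one range per block (objective: simpler).

-- ===== PORT A =====
-- p is kept reversed (cons for p.append) and reversed once at return, the standard
-- transcription of a Python append loop; the loop structure is A's.
-- inner loop body: val = val + 1; p.append(val)
def pvAInner (st : List Int × Int) (_ : Int) : List Int × Int :=
  ((st.2 + 1) :: st.1, st.2 + 1)

-- outer loop body: val = val + 2; p.append(val); for j in range(1, i+1): …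
def pvAStep (st : List Int × Int) (i : Int) : List Int × Int :=
  let val := st.2 + 2
  (PySem.List.pyRange 1 (i + 1) 1).foldl pvAInner (val :: st.1, val)

def calcul_pozitie (n : Int) : List Int :=
  ((PySem.List.pyRange 0 n 1).foldl pvAStep ([], 0)).1.reverse

-- ===== PORT B =====
def pvBStep (p : List Int) (i : Int) : List Int :=
  let start := 2 + PySem.Int.floordiv (i * (i + 3)) 2
  p ++ PySem.List.pyRange start (start + i + 1) 1

def calcul_pozitie_alt (n : Int) : List Int :=
  (PySem.List.pyRange 0 n 1).foldl pvBStep []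

-- ===== PRECONDITION & SPEC =====
def Spec_calcul_pozitie (n : Int) (out : List Int) : Prop := out = calcul_pozitie_alt n
instance (n : Int) (out : List Int) : Decidable (Spec_calcul_pozitie n out) := by unfold Spec_calcul_pozitie; infer_instance

-- ===== CLAIM (what is proved, stated in full; the proofs are below) =====
def Claim_equal_calcul_pozitie : Prop := ∀ (n : Int), Dom_calcul_pozitie n → Spec_calcul_pozitie n (calcul_pozitie n)

-- ===== LEMMAS AND PROOFS =====

-- A's inner loop pushes val+1, …, val+j (reversed) and leaves val+j in the counter.
lemma pvInner_eq (j : Nat) (p : List Int) (val : Int) :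
    (PySem.List.pyRange 1 ((j : Int) + 1) 1).foldl pvAInner (p, val)
      = ((PySem.List.pyRange (val + 1) (val + (j : Int) + 1) 1).reverse ++ p, val + (j : Int)) := by
  induction j generalizing p val with
  | zero =>
      rw [PySem.List.pyRange_one_eq_nil (by omega : ((0:Nat):Int) + 1 ≤ 1),
        PySem.List.pyRange_one_eq_nil (by omega : val + ((0:Nat):Int) + 1 ≤ val + 1)]
      simp
  | succ j ih =>
      have h1 : ((j + 1 : Nat) : Int) + 1 = ((j : Int) + 1) + 1 := by push_cast; ring
      rw [h1, PySem.List.pyRange_one_succ_right (by omega : (1:Int) ≤ (j:Int) + 1),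
        List.foldl_append, ih]
      have h2 : val + ((j + 1 : Nat) : Int) + 1 = (val + (j : Int) + 1) + 1 := by push_cast; ring
      rw [h2, PySem.List.pyRange_one_succ_right (by omega : val + 1 ≤ val + (j:Int) + 1)]
      simp [pvAInner]
      ring

-- Nat arithmetic for the block starts.
lemma pvV_succ (m : Nat) : (m + 1) * (m + 1 + 3) / 2 = m * (m + 3) / 2 + (m + 2) := by
  have h : (m + 1) * (m + 1 + 3) = m * (m + 3) + (m + 2) * 2 := by ring
  rw [h, Nat.add_mul_div_right _ _ (by omega : 0 < 2)]

-- After m outer iterations A's pair is (B's list reversed, m*(m+3)/2).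
lemma pvMain (m : Nat) :
    (PySem.List.pyRange 0 (m : Int) 1).foldl pvAStep ([], 0)
      = (((PySem.List.pyRange 0 (m : Int) 1).foldl pvBStep []).reverse, ((m * (m + 3) / 2 : Nat) : Int)) := by
  induction m with
  | zero => simp [PySem.List.pyRange_one_eq_nil (by omega : (0:Int) ≤ 0)]
  | succ m ih =>
      have hc : ((m + 1 : Nat) : Int) = (m : Int) + 1 := by push_cast; ring
      rw [hc, PySem.List.pyRange_one_succ_right (by positivity : (0:Int) ≤ (m:Int)),
        List.foldl_append, List.foldl_append, ih]
      have hfd : PySem.Int.floordiv ((m : Int) * ((m : Int) + 3)) 2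
          = ((m * (m + 3) / 2 : Nat) : Int) := by
        have : ((m : Int) * ((m : Int) + 3)) = ((m * (m + 3) : Nat) : Int) := by push_cast; ring
        rw [this]
        exact_mod_cast PySem.Int.floordiv_natCast (m * (m + 3)) 2
      set V : Int := ((m * (m + 3) / 2 : Nat) : Int) with hV
      set B : List Int := (PySem.List.pyRange 0 (m : Int) 1).foldl pvBStep [] with hB
      have hinner := pvInner_eq m ((V + 2) :: B.reverse) (V + 2)
      unfold pvAStep pvBStep
      simp only []
      simp only [List.foldl_cons, List.foldl_nil]
      rw [hinner, hfd]
      simp only [Prod.mk.injEq]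
      refine ⟨?_, ?_⟩
      · -- the lists agree
        have hcons : PySem.List.pyRange (2 + V) (2 + V + (m : Int) + 1) 1
            = (2 + V) :: PySem.List.pyRange (2 + V + 1) (2 + V + (m : Int) + 1) 1 :=
          PySem.List.pyRange_one_cons (by omega)
        have e1 : V + 2 + (m : Int) + 1 = 2 + V + (m : Int) + 1 := by ring
        have e2 : V + 2 + 1 = 2 + V + 1 := by ring
        rw [e1, e2, hcons]
        simp
        ring
      · -- the counters agree
        rw [hV]
        have := pvV_succ m
        push_cast [this]
        ring

-- ===== VERDICT (by name: the statement is the Claim_ definition above) =====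
theorem calcul_pozitie_spec : Claim_equal_calcul_pozitie := by
  intro n _
  unfold Spec_calcul_pozitie calcul_pozitie calcul_pozitie_alt
  by_cases h : n ≤ 0
  · rw [PySem.List.pyRange_one_eq_nil h]
    rfl
  · have hn : n = ((n.toNat : Nat) : Int) := by omega
    rw [hn, pvMain, List.reverse_reverse]
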